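-- pv_equiv track=rewrite | github.com/SlightlyOffset/PSCP_Problems | PhoneNumber.py | format_from_right
-- ===== SOURCE A (Python) =====
-- def format_from_right(phone_number):
--     '''format phone number from right'''
--     formatted_number = ''
--     counter = 0
--     for number in reversed(phone_number):       # Format from last digit to first
--         formatted_number += number
--         counter += 1
--         if counter == 4:
--             formatted_number += ' '
--             counter = 0
--     return ''.join(reversed(formatted_number))  # Undo the reverse and return
-- ===== SOURCE B (Python) =====
-- def format_from_right(phone_number):
--     '''format phone number from right'''
--     n = len(phone_number)
--     result = []
--     for i, ch in enumerate(phone_number):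
--         if (n - i) % 4 == 0:
--             result.append(' ')
--         result.append(ch)
--     return ''.join(result)
-- ===== Notes on version B (the rewrite author's own statement) =====
-- stated objective: simpler
-- what changed: Single left-to-right pass computing group boundaries by modular arithmetic ((n-i) % 4 == 0) into an appended list, instead of reversing the string, counting runs of 4 while concatenating, and reversing back.
import Mathlib
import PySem

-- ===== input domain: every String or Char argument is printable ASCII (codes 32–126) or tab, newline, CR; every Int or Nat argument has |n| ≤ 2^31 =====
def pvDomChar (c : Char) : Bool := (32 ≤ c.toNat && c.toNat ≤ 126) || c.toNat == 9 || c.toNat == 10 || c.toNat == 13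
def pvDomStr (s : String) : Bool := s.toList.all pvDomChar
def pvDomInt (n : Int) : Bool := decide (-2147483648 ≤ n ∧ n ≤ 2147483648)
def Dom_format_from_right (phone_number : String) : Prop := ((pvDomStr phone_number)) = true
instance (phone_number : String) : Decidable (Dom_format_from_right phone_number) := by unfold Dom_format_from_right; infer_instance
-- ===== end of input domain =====

-- B replaces A's reverse / count-to-4 / reverse-back loop with one left-to-right pass
-- that places a space where (n - i) % 4 == 0 (objective: simpler).

-- ===== PORT A =====
-- A's loop body: append the char, bump the counter, emit ' ' and reset at 4
def pvStepA (st : List Char × Int) (c : Char) : List Char × Int :=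
  let acc := st.1 ++ [c]
  let k := st.2 + 1
  if k == 4 then (acc ++ [' '], 0) else (acc, k)

def format_from_right (phone_number : String) : String :=
  let r := phone_number.toList.reverse.foldl pvStepA ([], 0)
  String.mk r.1.reverse

-- ===== PORT B =====
def format_from_right_alt (phone_number : String) : String :=
  let l := phone_number.toList
  let n : Int := l.length
  let out := (PySem.List.enumerate l).foldl
    (fun acc p =>
      let acc1 := if (n - p.1) % 4 == 0 then acc ++ [' '] else acc
      acc1 ++ [p.2]) []
  String.mk out

-- ===== PRECONDITION & SPEC =====
def Spec_format_from_right (phone_number : String) (out : String) : Prop := out = format_from_right_alt phone_number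
instance (phone_number : String) (out : String) : Decidable (Spec_format_from_right phone_number out) := by unfold Spec_format_from_right; infer_instance

-- ===== CLAIM (what is proved, stated in full; the proofs are below) =====
def Claim_equal_format_from_right : Prop := ∀ (phone_number : String), Dom_format_from_right phone_number → Spec_format_from_right phone_number (format_from_right phone_number)

-- ===== LEMMAS AND PROOFS =====

-- the common shape: spaces at positions i with (c + n - i) % 4 == 0, counter offset c
def pvOut (l : List Char) (c : Int) : List Char :=
  (PySem.List.enumerate l).flatMap
    (fun p => if (c + l.length - p.1) % 4 == 0 then [' ', p.2] else [p.2])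

theorem pvFoldA_acc (r : List Char) (acc : List Char) (c : Int) :
    r.foldl pvStepA (acc, c)
      = (acc ++ (r.foldl pvStepA ([], c)).1, (r.foldl pvStepA ([], c)).2) := by
  induction r generalizing acc c with
  | nil => simp
  | cons a t ih =>
      simp only [List.foldl_cons, pvStepA]
      split
      · rw [ih, ih ([] ++ [a] ++ [' '])]; simp
      · rw [ih, ih ([] ++ [a])]; simp

theorem pvOut_snoc (t : List Char) (a : Char) (c c' : Int)
    (hc : (c + 1) % 4 = c' % 4) :
    pvOut (t ++ [a]) c
      = pvOut t c' ++ (if (c + 1) % 4 == 0 then [' ', a] else [a]) := by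
  simp only [pvOut, PySem.List.enumerate_append, List.flatMap_append,
    PySem.List.enumerate_cons, PySem.List.enumerate_nil, List.flatMap_cons,
    List.flatMap_nil, List.append_nil, List.length_append, List.length_cons,
    List.length_nil, Nat.zero_add]
  have h1 : (fun p : Int × Char =>
      if (c + (↑(t.length + 1) : Int) - p.1) % 4 == 0 then [' ', p.2] else [p.2])
      = (fun p : Int × Char =>
      if (c' + (t.length : Int) - p.1) % 4 == 0 then [' ', p.2] else [p.2]) := by
    funext p
    have h : (c + (↑(t.length + 1) : Int) - p.1) % 4 = (c' + (t.length : Int) - p.1) % 4 := by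
      push_cast
      omega
    rw [h]
  have h2 : (c + (↑(t.length + 1) : Int) - (0 + (t.length : Int))) % 4 = (c + 1) % 4 := by
    push_cast; ring_nf
  rw [h1, h2]

theorem pvMainA (l : List Char) (c : Int) (h0 : 0 ≤ c) (h4 : c < 4) :
    (l.reverse.foldl pvStepA ([], c)).1.reverse = pvOut l c := by
  induction l using List.reverseRecOn generalizing c with
  | nil => simp [pvOut, PySem.List.enumerate]
  | append_singleton t a ih =>
      have hrev : (t ++ [a]).reverse = a :: t.reverse := by simp
      rw [hrev]
      simp only [List.foldl_cons, pvStepA]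
      by_cases hc : c + 1 = 4
      · have hbeq : ((c + 1 : Int) == 4) = true := by simp [hc]
        rw [if_pos hbeq, pvFoldA_acc]
        have hout : pvOut (t ++ [a]) c = pvOut t 0 ++ [' ', a] := by
          have := pvOut_snoc t a c 0 (by omega)
          rw [this, if_pos (by simp [hc])]
        rw [hout, ← ih 0 (by omega) (by omega)]
        simp
      · have hbeq : ((c + 1 : Int) == 4) = false := by simp [hc]
        rw [if_neg (by simp [hbeq]), pvFoldA_acc]
        have hout : pvOut (t ++ [a]) c = pvOut t (c + 1) ++ [a] := by
          have := pvOut_snoc t a c (c + 1) rfl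
          rw [this, if_neg (by simp; omega)]
        rw [hout, ← ih (c + 1) (by omega) (by omega)]
        simp

theorem pvAltB (l : List Char) :
    (PySem.List.enumerate l).foldl
      (fun acc p =>
        let acc1 := if ((l.length : Int) - p.1) % 4 == 0 then acc ++ [' '] else acc
        acc1 ++ [p.2]) []
      = pvOut l 0 := by
  have hfun : (fun (acc : List Char) (p : Int × Char) =>
      let acc1 := if ((l.length : Int) - p.1) % 4 == 0 then acc ++ [' '] else acc
      acc1 ++ [p.2])
      = (fun acc p =>
        acc ++ (if ((0 : Int) + l.length - p.1) % 4 == 0 then [' ', p.2] else [p.2])) := by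
    funext acc p
    have h : ((0 : Int) + l.length - p.1) % 4 = ((l.length : Int) - p.1) % 4 := by omega
    rw [h]
    by_cases hcond : (((l.length : Int) - p.1) % 4 == 0) = true
    · simp [hcond]
    · simp at hcond; simp [hcond]
  rw [hfun, PySem.List.foldl_append_eq_flatMap]
  rfl

-- ===== VERDICT (by name: the statement is the Claim_ definition above) =====
theorem format_from_right_spec : Claim_equal_format_from_right := by
  intro s _
  unfold Spec_format_from_right format_from_right format_from_right_alt
  simp only []
  rw [pvMainA s.toList 0 (by omega) (by omega), pvAltB]
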